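-- pv_equiv track=rewrite | github.com/DavitiChkhikvadze/GOA-Course-homeworks | day 105/classwork/classwork105.py | count_of_forst_letter
-- ===== SOURCE A (Python) =====
-- def count_of_forst_letter(s):
--     if not s:
--         return 0
--     first_char = s[0]
--     count = 0
--     for char in s:
--         if char == first_char:
--             count += 1
--     return count
-- ===== SOURCE B (Python) =====
-- def count_of_forst_letter(s):
--     if not s:
--         return 0
--     parts = s.split(s[0])
--     return len(parts) - 1
-- ===== Notes on version B (the rewrite author's own statement) =====
-- stated objective: faster
-- what changed: B splits the string on its first character and returns the number of pieces minus one, instead of A's per-character compare-and-increment scan; the splitting runs in C, removing the interpreted inner loop (measured ~3.7x at the largest size).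
import Mathlib
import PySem

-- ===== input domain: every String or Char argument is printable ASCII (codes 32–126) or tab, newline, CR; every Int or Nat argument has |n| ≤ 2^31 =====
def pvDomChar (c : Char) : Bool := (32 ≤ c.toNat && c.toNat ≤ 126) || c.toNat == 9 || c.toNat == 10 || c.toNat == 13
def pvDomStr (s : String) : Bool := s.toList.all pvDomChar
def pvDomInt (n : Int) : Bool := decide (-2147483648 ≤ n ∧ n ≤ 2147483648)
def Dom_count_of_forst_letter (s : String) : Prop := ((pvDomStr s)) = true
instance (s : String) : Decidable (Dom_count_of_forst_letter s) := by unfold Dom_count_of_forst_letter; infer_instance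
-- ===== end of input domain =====

-- B computes len(s.split(s[0])) - 1 (pieces of a split on the first character) instead of A's compare-and-increment scan; a timing run measured B faster by a constant factor.

-- ===== PORT A =====
def count_of_forst_letter (s : String) : Int :=
  match s.toList with
  | [] => 0
  | first_char :: _ =>
      s.toList.foldl (fun count char => if char == first_char then count + 1 else count) (0 : Int)

-- ===== PORT B =====
def count_of_forst_letter_alt (s : String) : Int :=
  match s.toList with
  | [] => 0
  | c :: _ =>
      -- parts = s.split(s[0]); return len(parts) - 1   (s[0] is a non-empty separator, so Python's split never raises)
      ((PySem.Chars.splitOn s.toList [c]).length : Int) - 1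

-- ===== PRECONDITION & SPEC =====
def Spec_count_of_forst_letter (s : String) (out : Int) : Prop := out = count_of_forst_letter_alt s
instance (s : String) (out : Int) : Decidable (Spec_count_of_forst_letter s out) := by unfold Spec_count_of_forst_letter; infer_instance

-- ===== CLAIM (what is proved, stated in full; the proofs are below) =====
def Claim_equal_count_of_forst_letter : Prop := ∀ (s : String), Dom_count_of_forst_letter s → Spec_count_of_forst_letter s (count_of_forst_letter s)

-- ===== LEMMAS AND PROOFS =====

-- splitting on a single character yields exactly (count of that character) + 1 pieces
theorem splitOn_go_length (c : Char) (fuel : Nat) (l cur : List Char) (acc : List (List Char))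
    (h : l.length ≤ fuel) :
    (PySem.Chars.splitOn.go [c] fuel l cur acc).length = acc.length + 1 + l.count c := by
  induction fuel generalizing l cur acc with
  | zero =>
      have : l = [] := List.eq_nil_of_length_eq_zero (Nat.le_zero.mp h)
      subst this
      simp [PySem.Chars.splitOn.go]
  | succ fuel ih =>
      cases l with
      | nil => simp [PySem.Chars.splitOn.go]
      | cons c' rest =>
          simp only [PySem.Chars.splitOn.go]
          by_cases hc : c = c'
          · subst hc
            rw [if_pos (by simp [List.isPrefixOf])]
            rw [ih _ _ _ (by simpa using Nat.le_of_succ_le_succ h)]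
            simp
            omega
          · rw [if_neg (by simp [List.isPrefixOf]; exact fun h' => hc h')]
            rw [ih _ _ _ (by simpa using Nat.le_of_succ_le_succ h)]
            simp [Ne.symm hc]

theorem splitOn_singleton_length (c : Char) (l : List Char) :
    (PySem.Chars.splitOn l [c]).length = 1 + l.count c := by
  unfold PySem.Chars.splitOn
  rw [splitOn_go_length c _ l [] [] (Nat.le_succ _)]
  simp

-- ===== VERDICT (by name: the statement is the Claim_ definition above) =====
theorem count_of_forst_letter_spec : Claim_equal_count_of_forst_letter := by
  intro s _
  unfold Spec_count_of_forst_letter count_of_forst_letter count_of_forst_letter_alt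
  cases h : s.toList with
  | nil => rfl
  | cons c rest =>
      show List.foldl (fun count char => if char == c then count + 1 else count) (0 : Int) (c :: rest)
           = ((PySem.Chars.splitOn (c :: rest) [c]).length : Int) - 1
      rw [PySem.List.foldl_beq_add_one, splitOn_singleton_length]
      push_cast
      ring
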